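-- pv_equiv track=rewrite | github.com/pypi-data/pypi-mirror-275 | packages/rxhands-unam-colab/rxhands_unam_colab-0.22-py3-none-any.whl/rxhands/auxiliary.py | registrar_equivalencias
-- ===== SOURCE A (Python) =====
-- def registrar_equivalencias(valores, equivalencias):
--     valores = set(valores)
--     found = []
--     new_equivalencias = []
--     for i in range(len(equivalencias)):
--         grupo = equivalencias[i]
--         for valor in list(valores):
--             if valor in grupo:
--                 if i not in found:
--                     found.append(i)
--     if len(found) > 0:
--         for i in range(len(equivalencias)):
--             if i in found:
--                 valores = valores.union(equivalencias[i])
--             else: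
--                 new_equivalencias.append(equivalencias[i])
--     else:
--         new_equivalencias = equivalencias
--     new_equivalencias.append(valores)
--     return new_equivalencias
-- ===== SOURCE B (Python) =====
-- def registrar_equivalencias(valores, equivalencias):
--     base = set(valores)
--     merged = set(base)
--     new_equivalencias = []
--     for grupo in equivalencias:
--         if base.isdisjoint(grupo):
--             new_equivalencias.append(grupo)
--         else:
--             merged.update(grupo)
--     new_equivalencias.append(merged)
--     return new_equivalencias
-- ===== Notes on version B (the rewrite author's own statement) =====
-- stated objective: faster
-- what changed: Single pass using set.isdisjoint per group instead of A's two index loops with a per-element membership scan over all values and a found-index list searched linearly.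
import Mathlib
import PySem

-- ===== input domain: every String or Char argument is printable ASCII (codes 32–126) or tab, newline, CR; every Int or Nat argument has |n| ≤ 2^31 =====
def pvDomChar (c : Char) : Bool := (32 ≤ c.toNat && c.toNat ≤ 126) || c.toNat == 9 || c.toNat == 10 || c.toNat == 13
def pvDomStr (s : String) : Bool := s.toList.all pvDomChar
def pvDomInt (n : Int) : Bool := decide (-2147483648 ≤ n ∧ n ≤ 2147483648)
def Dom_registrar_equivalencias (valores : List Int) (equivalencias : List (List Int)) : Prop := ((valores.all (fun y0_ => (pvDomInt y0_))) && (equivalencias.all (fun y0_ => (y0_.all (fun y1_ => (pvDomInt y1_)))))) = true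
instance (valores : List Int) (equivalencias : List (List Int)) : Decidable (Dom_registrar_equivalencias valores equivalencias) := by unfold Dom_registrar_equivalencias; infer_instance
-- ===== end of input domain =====

-- B replaces A's two index loops (per-element membership scan over all values, plus a linearly
-- searched found-index list) by one pass with a per-group disjointness test; objective: faster.
-- Note: when no group matches, Python A appends to the caller's `equivalencias` list in place
-- (B does not mutate its arguments); the equivalence proved here is about the RETURN value only.


-- ===== PORT A =====
-- inner loop: for valor in list(valores): if valor in grupo: if i not in found: found.append(i)
-- (result does not depend on the set's iteration order: found gains i at most once)
def pvAInner (grupo : List Int) (i : Nat) : List Int → List Nat → List Nat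
  | [], found => found
  | v :: vs, found =>
      pvAInner grupo i vs
        (if v ∈ grupo then (if i ∈ found then found else found ++ [i]) else found)

-- outer loop: for i in range(len(equivalencias)): grupo = equivalencias[i]; …
def pvAFound (valoresS : PySem.Set Int) : Nat → List (List Int) → List Nat → List Nat
  | _, [], found => found
  | i, g :: gs, found => pvAFound valoresS (i + 1) gs (pvAInner g i valoresS found)

-- second loop: union matched groups into valores, collect the rest
def pvAMerge (found : List Nat) :
    Nat → List (List Int) → PySem.Set Int → List (List Int) → PySem.Set Int × List (List Int)
  | _, [], s, acc => (s, acc)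
  | i, g :: gs, s, acc =>
      if i ∈ found then pvAMerge found (i + 1) gs (PySem.Set.union s g) acc
      else pvAMerge found (i + 1) gs s (acc ++ [g])

def registrar_equivalencias (valores : List Int) (equivalencias : List (List Int)) : List (List Int) :=
  let valoresS := PySem.Set.ofList valores
  let found := pvAFound valoresS 0 equivalencias []
  if found.length > 0 then
    let st := pvAMerge found 0 equivalencias valoresS []
    st.2 ++ [st.1]
  else
    equivalencias ++ [valoresS]

-- ===== PORT B =====
def pvBStep (base : PySem.Set Int) (st : PySem.Set Int × List (List Int)) (grupo : List Int) :
    PySem.Set Int × List (List Int) :=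
  if PySem.Set.isdisjoint base grupo then (st.1, st.2 ++ [grupo])
  else (PySem.Set.union st.1 grupo, st.2)

def registrar_equivalencias_alt (valores : List Int) (equivalencias : List (List Int)) : List (List Int) :=
  let base := PySem.Set.ofList valores
  let st := equivalencias.foldl (pvBStep base) (base, [])
  st.2 ++ [st.1]

-- ===== PRECONDITION & SPEC =====
def Spec_registrar_equivalencias (valores : List Int) (equivalencias : List (List Int)) (out : List (List Int)) : Prop := out = registrar_equivalencias_alt valores equivalencias
instance (valores : List Int) (equivalencias : List (List Int)) (out : List (List Int)) : Decidable (Spec_registrar_equivalencias valores equivalencias out) := by unfold Spec_registrar_equivalencias; infer_instance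

-- ===== CLAIM (what is proved, stated in full; the proofs are below) =====
def Claim_equal_registrar_equivalencias : Prop := ∀ (valores : List Int) (equivalencias : List (List Int)), Dom_registrar_equivalencias valores equivalencias → Spec_registrar_equivalencias valores equivalencias (registrar_equivalencias valores equivalencias)

-- ===== LEMMAS AND PROOFS =====

lemma pvAInner_eq (g : List Int) (i : Nat) (vs : List Int) (acc : List Nat) :
    pvAInner g i vs acc = if i ∉ acc ∧ ∃ v ∈ vs, v ∈ g then acc ++ [i] else acc := by
  induction vs generalizing acc with
  | nil => simp [pvAInner]
  | cons v vs ih =>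
    by_cases hv : v ∈ g
    · by_cases hi : i ∈ acc
      · simp [pvAInner, hv, hi, ih]
      · simp [pvAInner, hv, hi, ih]
    · simp only [pvAInner, ih]
      simp [hv]

lemma mem_pvAFound (S : PySem.Set Int) (gs : List (List Int)) (k : Nat) (acc : List Nat) (i : Nat) :
    i ∈ pvAFound S k gs acc ↔
      i ∈ acc ∨ ∃ j : Nat, ∃ h : j < gs.length, i = k + j ∧ ∃ v ∈ S, v ∈ gs[j] := by
  induction gs generalizing k acc with
  | nil => simp [pvAFound]
  | cons g gs ih =>
    rw [pvAFound, ih, pvAInner_eq]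
    constructor
    · rintro (hmem | ⟨j, hj, rfl, hv⟩)
      · split_ifs at hmem with hc
        · rcases List.mem_append.mp hmem with h | h
          · exact Or.inl h
          · simp at h
            subst h
            exact Or.inr ⟨0, by simp, by simpa using hc.2⟩
        · exact Or.inl hmem
      · exact Or.inr ⟨j + 1, by simpa using hj, by constructor; omega; simpa using hv⟩
    · rintro (hmem | ⟨j, hj, hij, hv⟩)
      · left; split_ifs <;> simp [hmem]
      · cases j with
        | zero =>
          simp only [List.getElem_cons_zero] at hv
          left
          by_cases hk : i ∈ acc
          · split_ifs <;> simp [hk]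
          · have hcond : (k ∉ acc ∧ ∃ v ∈ S, v ∈ g) := ⟨by simpa [hij] using hk, hv⟩
            rw [if_pos hcond]
            simp
            omega
        | succ j =>
          right
          exact ⟨j, by simpa using hj, by constructor; omega; simpa using hv⟩

-- the two second-phase loops agree when the found test matches the disjointness test index-wise
lemma pvAMerge_eq_foldl (base : PySem.Set Int) (found : List Nat) (gs : List (List Int))
    (k : Nat) (s : PySem.Set Int) (acc : List (List Int))
    (h : ∀ j : Nat, ∀ hj : j < gs.length, (k + j ∈ found ↔ ¬ PySem.Set.isdisjoint base gs[j] = true)) :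
    pvAMerge found k gs s acc = gs.foldl (pvBStep base) (s, acc) := by
  induction gs generalizing k s acc with
  | nil => simp [pvAMerge]
  | cons g gs ih =>
    have h0 : k ∈ found ↔ ¬ PySem.Set.isdisjoint base g = true := by
      simpa using h 0 (by simp)
    have htail : ∀ j : Nat, ∀ hj : j < gs.length,
        (k + 1 + j ∈ found ↔ ¬ PySem.Set.isdisjoint base gs[j] = true) := by
      intro j hj
      have e : k + (j + 1) = k + 1 + j := by omega
      simpa [e] using h (j + 1) (by simpa using Nat.succ_lt_succ hj)
    rw [pvAMerge, List.foldl_cons]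
    by_cases hd : PySem.Set.isdisjoint base g = true
    · rw [if_neg (by simp [h0, hd]), ih (k + 1) s (acc ++ [g]) htail]
      simp [pvBStep, hd]
    · rw [if_pos (h0.mpr hd), ih (k + 1) (PySem.Set.union s g) acc htail]
      simp [pvBStep, hd]

-- when every group is disjoint from base, B's fold just copies the groups through
lemma foldl_pvBStep_all_disjoint (base : PySem.Set Int) (gs : List (List Int))
    (s : PySem.Set Int) (acc : List (List Int))
    (h : ∀ g ∈ gs, PySem.Set.isdisjoint base g = true) :
    gs.foldl (pvBStep base) (s, acc) = (s, acc ++ gs) := by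
  induction gs generalizing acc with
  | nil => simp
  | cons g gs ih =>
    rw [List.foldl_cons]
    have hd := h g (by simp)
    rw [show pvBStep base (s, acc) g = (s, acc ++ [g]) by simp [pvBStep, hd]]
    rw [ih (acc ++ [g]) (fun g hg => h g (List.mem_cons_of_mem _ hg))]
    simp

lemma exists_mem_iff_not_disjoint (base : PySem.Set Int) (g : List Int) :
    (∃ v ∈ base, v ∈ g) ↔ ¬ PySem.Set.isdisjoint base g = true := by
  rw [PySem.Set.isdisjoint_iff]
  push_neg
  simp

-- ===== VERDICT (by name: the statement is the Claim_ definition above) =====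
theorem registrar_equivalencias_spec : Claim_equal_registrar_equivalencias := by
  intro valores equivalencias _
  unfold Spec_registrar_equivalencias registrar_equivalencias registrar_equivalencias_alt
  set base := PySem.Set.ofList valores with hbase
  set found := pvAFound base 0 equivalencias [] with hfound
  have hmem : ∀ j : Nat, ∀ hj : j < equivalencias.length,
      (0 + j ∈ found ↔ ¬ PySem.Set.isdisjoint base equivalencias[j] = true) := by
    intro j hj
    rw [hfound, mem_pvAFound, ← exists_mem_iff_not_disjoint]
    constructor
    · rintro (h | ⟨j', hj', hjj, hv⟩)
      · simp at h
      · have : j' = j := by omega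
        subst this
        exact hv
    · intro hv
      exact Or.inr ⟨j, hj, by omega, hv⟩
  by_cases hlen : found.length > 0
  · rw [if_pos hlen, pvAMerge_eq_foldl base found equivalencias 0 base [] hmem]
  · rw [if_neg hlen]
    have hnil : found = [] := List.eq_nil_of_length_eq_zero (by omega)
    have hall : ∀ g ∈ equivalencias, PySem.Set.isdisjoint base g = true := by
      intro g hg
      rcases List.mem_iff_getElem.mp hg with ⟨j, hj, rfl⟩
      by_contra hd
      have := (hmem j hj).mpr hd
      simp [hnil] at this
    show equivalencias ++ [base] =
      (List.foldl (pvBStep base) (base, []) equivalencias).2 ++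
        [(List.foldl (pvBStep base) (base, []) equivalencias).1]
    rw [foldl_pvBStep_all_disjoint base equivalencias base [] hall]
    simp
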